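-- pv_equiv track=rewrite | github.com/jonathanhouge/MRCV | rcv-schemes/topmost_median_rank.py | typical_judgement
-- ===== SOURCE A (Python) =====
-- from collections import defaultdict
-- from typing import Hashable
--
-- def typical_judgement(
--     winners: list[Hashable],
--     ranks: defaultdict[Hashable, list[int]],
--     candidates: list[Hashable],
-- ) -> list[Hashable]:
--     for candidate in candidates:
--         if candidate not in winners:
--             ranks.pop(candidate)
--
--     max_difference: int | None = None
--     for key, values in ranks.items():
--         median_index: int = len(values) // 2
--         median = values[median_index]
--
--         # help from https://stackoverflow.com/a/15375122 - i am not good at generator expressions yet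
--         proponents: int = sum(value < median for value in values)
--         opponents: int = sum(value > median for value in values)
--         difference: int = proponents - opponents
--
--         if max_difference is None or difference > max_difference:
--             max_difference = difference
--             winners = [key]
--         elif max_difference == difference:
--             winners.append(key)
--
--     return winners
-- ===== SOURCE B (Python) =====
-- def _median_diff(values):
--     median = values[len(values) // 2]
--     return sum((v < median) - (v > median) for v in values)
--
--
-- def typical_judgement(winners, ranks, candidates):
--     # note: like A, this pops non-winner candidates from `ranks` in place
--     for candidate in candidates:
--         if candidate not in winners:
--             ranks.pop(candidate)
--
--     if not ranks:
--         return winners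
--
--     table = [(key, _median_diff(values)) for key, values in ranks.items()]
--     best = max(d for _, d in table)
--     return [key for key, d in table if d == best]
-- ===== Notes on version B (the rewrite author's own statement) =====
-- stated objective: simpler
-- what changed: A's online state machine (an Optional running max plus a rebuilt/appended winners list, with a three-way branch per entry) is replaced by a compute-then-select pipeline: build a (key, difference) table with the per-entry difference folded in ONE pass as sum((v<median)-(v>median)) instead of A's two separate counting passes, take the max of the table, and filter the keys achieving it; the empty-ranks case returns the input winners as A does.
import Mathlib
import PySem

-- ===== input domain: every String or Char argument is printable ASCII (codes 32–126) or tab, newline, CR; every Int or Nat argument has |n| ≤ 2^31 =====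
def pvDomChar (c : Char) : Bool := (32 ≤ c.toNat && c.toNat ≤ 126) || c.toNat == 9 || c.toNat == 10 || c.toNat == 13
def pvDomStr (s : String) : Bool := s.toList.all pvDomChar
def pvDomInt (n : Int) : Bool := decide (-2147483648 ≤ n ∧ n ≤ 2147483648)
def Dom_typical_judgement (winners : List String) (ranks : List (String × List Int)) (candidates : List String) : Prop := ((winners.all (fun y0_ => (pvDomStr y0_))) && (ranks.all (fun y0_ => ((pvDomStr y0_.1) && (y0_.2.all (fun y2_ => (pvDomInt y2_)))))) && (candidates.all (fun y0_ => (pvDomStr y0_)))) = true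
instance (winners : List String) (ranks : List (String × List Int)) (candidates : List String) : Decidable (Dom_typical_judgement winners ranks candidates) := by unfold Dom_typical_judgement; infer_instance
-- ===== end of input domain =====

-- B replaces A's running-max/append state machine by a compute-diffs table, a max, and a
-- filter (objective: simpler).  Both Pythons pop non-winner candidates from `ranks` in
-- place identically; the equivalence proved here is about the return value.

-- ===== PORT A =====
-- `ranks.pop(candidate)` raises KeyError when absent; `values[len(values)//2]` raises
-- IndexError on an empty list — both excluded by Pre_ below (the port defaults there).
def typical_judgement (winners : List String) (ranks : List (String × List Int)) (candidates : List String) : List String :=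
  let ranks1 := candidates.foldl
    (fun r c => if winners.contains c then r else r.eraseP (fun kv => kv.1 == c)) ranks
  (ranks1.foldl
    (fun (st : Option Int × List String) kv =>
      let values := kv.2
      let median : Int := (PySem.List.pyGet? values (Int.ofNat (values.length / 2))).getD 0
      let proponents : Int := values.foldl (fun s v => s + (if v < median then 1 else 0)) 0
      let opponents : Int := values.foldl (fun s v => s + (if v > median then 1 else 0)) 0
      let difference := proponents - opponents
      match st.1 with
      | none => (some difference, [kv.1])
      | some md =>
        if difference > md then (some difference, [kv.1])
        else if md == difference then (some md, st.2 ++ [kv.1])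
        else st)
    ((none : Option Int), winners)).2

-- ===== PORT B =====
def tjMedianDiff (values : List Int) : Int :=
  let median : Int := (PySem.List.pyGet? values (Int.ofNat (values.length / 2))).getD 0
  values.foldl (fun s v => s + (if v < median then 1 else 0) - (if v > median then 1 else 0)) 0

def typical_judgement_alt (winners : List String) (ranks : List (String × List Int)) (candidates : List String) : List String :=
  let ranks1 := candidates.foldl
    (fun r c => if winners.contains c then r else r.eraseP (fun kv => kv.1 == c)) ranks
  if ranks1.isEmpty then winners
  else
    let table := ranks1.map (fun kv => (kv.1, tjMedianDiff kv.2))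
    let best := (PySem.List.max? (table.map (fun kv => kv.2)) (fun d => d)).getD 0
    (table.filter (fun kv => kv.2 == best)).map (fun kv => kv.1)

-- ===== PRECONDITION & SPEC =====
-- A raises KeyError when a non-winner candidate is missing from ranks (also when it is a
-- duplicate, since the first pop removed it), and IndexError when a surviving rank list is
-- empty; Pre_ excludes exactly those inputs.
def Pre_typical_judgement (winners : List String) (ranks : List (String × List Int)) (candidates : List String) : Prop :=
  (∀ c ∈ candidates, c ∉ winners → c ∈ ranks.map Prod.fst) ∧
  (candidates.filter (fun c => !winners.contains c)).Nodup ∧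
  (∀ kv ∈ ranks, (kv.1 ∈ candidates ∧ kv.1 ∉ winners) ∨ kv.2 ≠ [])
instance (winners : List String) (ranks : List (String × List Int)) (candidates : List String) : Decidable (Pre_typical_judgement winners ranks candidates) := by unfold Pre_typical_judgement; infer_instance

def pvWitness_typical_judgement : List String × (List (String × List Int)) × List String :=
  (["a"], [("a", [1, 2]), ("b", [3])], ["a", "b"])

def Spec_typical_judgement (winners : List String) (ranks : List (String × List Int)) (candidates : List String) (out : List String) : Prop := out = typical_judgement_alt winners ranks candidates
instance (winners : List String) (ranks : List (String × List Int)) (candidates : List String) (out : List String) : Decidable (Spec_typical_judgement winners ranks candidates out) := by unfold Spec_typical_judgement; infer_instance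

-- ===== CLAIM (what is proved, stated in full; the proofs are below) =====
def Claim_equal_typical_judgement : Prop := ∀ (winners : List String) (ranks : List (String × List Int)) (candidates : List String), Dom_typical_judgement winners ranks candidates → Pre_typical_judgement winners ranks candidates → Spec_typical_judgement winners ranks candidates (typical_judgement winners ranks candidates)

-- ===== LEMMAS AND PROOFS =====

-- two separate counting folds, subtracted, equal B's single fold
theorem tj_two_folds (median : Int) (values : List Int) : ∀ (a b : Int),
    (values.foldl (fun s v => s + (if v < median then 1 else 0)) a)
      - (values.foldl (fun s v => s + (if v > median then 1 else 0)) b)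
    = values.foldl (fun s v => s + (if v < median then 1 else 0) - (if v > median then 1 else 0)) (a - b) := by
  induction values with
  | nil => intro a b; simp
  | cons v t ih =>
    intro a b
    simp only [List.foldl_cons]
    rw [ih]
    ring_nf

-- A's per-entry difference is tjMedianDiff
theorem tj_diff_eq (values : List Int) :
    (values.foldl (fun s v => s + (if v < (PySem.List.pyGet? values (Int.ofNat (values.length / 2))).getD 0 then 1 else 0)) 0)
      - (values.foldl (fun s v => s + (if v > (PySem.List.pyGet? values (Int.ofNat (values.length / 2))).getD 0 then 1 else 0)) 0)
    = tjMedianDiff values := by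
  unfold tjMedianDiff
  rw [tj_two_folds]
  norm_num

-- A's loop body, rephrased through tjMedianDiff
def tjStep (st : Option Int × List String) (kv : String × List Int) : Option Int × List String :=
  match st.1 with
  | none => (some (tjMedianDiff kv.2), [kv.1])
  | some md =>
    if tjMedianDiff kv.2 > md then (some (tjMedianDiff kv.2), [kv.1])
    else if md == tjMedianDiff kv.2 then (some md, st.2 ++ [kv.1])
    else st

theorem tjStep_eq :
    (fun (st : Option Int × List String) (kv : String × List Int) =>
      let values := kv.2
      let median : Int := (PySem.List.pyGet? values (Int.ofNat (values.length / 2))).getD 0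
      let proponents : Int := values.foldl (fun s v => s + (if v < median then 1 else 0)) 0
      let opponents : Int := values.foldl (fun s v => s + (if v > median then 1 else 0)) 0
      let difference := proponents - opponents
      match st.1 with
      | none => (some difference, [kv.1])
      | some md =>
        if difference > md then (some difference, [kv.1])
        else if md == difference then (some md, st.2 ++ [kv.1])
        else st) = tjStep := by
  funext st kv
  simp only [tjStep, tj_diff_eq kv.2]

def tjKeysWith (d : Int) (l : List (String × List Int)) : List String :=
  ((l.map (fun kv => (kv.1, tjMedianDiff kv.2))).filter (fun kv => kv.2 == d)).map (fun kv => kv.1)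

def tjMax (m : Int) (l : List (String × List Int)) : Int :=
  l.foldl (fun a kv => max a (tjMedianDiff kv.2)) m

theorem tjMax_ge (l : List (String × List Int)) : ∀ m : Int, m ≤ tjMax m l := by
  induction l with
  | nil => intro m; simp [tjMax]
  | cons kv t ih =>
    intro m
    simp only [tjMax, List.foldl_cons]
    exact le_trans (le_max_left _ _) (ih (max m (tjMedianDiff kv.2)))

theorem tjMax_ge_mem (l : List (String × List Int)) : ∀ (m : Int), ∀ kv ∈ l, tjMedianDiff kv.2 ≤ tjMax m l := by
  induction l with
  | nil => intro m kv h; cases h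
  | cons x t ih =>
    intro m kv h
    rcases List.mem_cons.mp h with h | h
    · subst h
      exact le_trans (le_max_right _ _) (tjMax_ge t _)
    · exact ih _ kv h

theorem tjMax_eq_of_all_le (l : List (String × List Int)) : ∀ m : Int,
    (∀ kv ∈ l, tjMedianDiff kv.2 ≤ m) → tjMax m l = m := by
  induction l with
  | nil => intro m _; simp [tjMax]
  | cons x t ih =>
    intro m h
    simp only [tjMax, List.foldl_cons]
    have hx : tjMedianDiff x.2 ≤ m := h x (List.mem_cons_self ..)
    rw [max_eq_left hx]
    exact ih m (fun kv hk => h kv (List.mem_cons_of_mem _ hk))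

theorem tjMax_gt (l : List (String × List Int)) (m : Int) (kv : String × List Int)
    (h : kv ∈ l) (hlt : m < tjMedianDiff kv.2) : m < tjMax m l :=
  lt_of_lt_of_le hlt (tjMax_ge_mem l m kv h)

theorem tjKeysWith_cons (d : Int) (kv : String × List Int) (t : List (String × List Int)) :
    tjKeysWith d (kv :: t) =
      (if tjMedianDiff kv.2 = d then [kv.1] else []) ++ tjKeysWith d t := by
  simp only [tjKeysWith, List.map_cons, List.filter_cons]
  by_cases h : tjMedianDiff kv.2 = d <;> simp [h]

-- the invariant of A's state machine: running max, and winners = keys achieving it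
theorem tj_inv (l : List (String × List Int)) : ∀ (m : Int) (w : List String),
    l.foldl tjStep (some m, w)
      = (some (tjMax m l),
         if l.any (fun kv => decide (m < tjMedianDiff kv.2))
         then tjKeysWith (tjMax m l) l
         else w ++ tjKeysWith m l) := by
  induction l with
  | nil => intro m w; simp [tjMax, tjKeysWith]
  | cons kv t ih =>
    intro m w
    simp only [List.foldl_cons, List.any_cons]
    by_cases hgt : tjMedianDiff kv.2 > m
    · have hstep : tjStep (some m, w) kv = (some (tjMedianDiff kv.2), [kv.1]) := by
        simp [tjStep, hgt]
      rw [hstep, ih]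
      have hmax : tjMax m (kv :: t) = tjMax (tjMedianDiff kv.2) t := by
        simp [tjMax, max_eq_right (le_of_lt hgt)]
      rw [hmax]
      have hany : (decide (m < tjMedianDiff kv.2) || t.any fun kv => decide (m < tjMedianDiff kv.2)) = true := by
        simp [hgt]
      rw [if_pos hany]
      by_cases ht : t.any (fun kv => decide (tjMedianDiff kv.2 < tjMedianDiff kv.2)) = true
      · exact absurd ht (by simp)
      · by_cases ht2 : t.any (fun x => decide (tjMedianDiff kv.2 < tjMedianDiff x.2)) = true
        · rw [if_pos ht2]
          rcases List.any_eq_true.mp ht2 with ⟨x, hx, hlt⟩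
          have hF : tjMedianDiff kv.2 < tjMax (tjMedianDiff kv.2) t :=
            tjMax_gt t _ x hx (of_decide_eq_true hlt)
          rw [tjKeysWith_cons, if_neg (by omega), List.nil_append]
        · rw [if_neg ht2]
          have hall : ∀ x ∈ t, tjMedianDiff x.2 ≤ tjMedianDiff kv.2 := by
            intro x hx
            by_contra hc
            exact ht2 (List.any_eq_true.mpr ⟨x, hx, decide_eq_true (by omega)⟩)
          rw [tjMax_eq_of_all_le t _ hall, tjKeysWith_cons, if_pos rfl]
    · have hstep : tjStep (some m, w) kv =
          (some m, w ++ (if tjMedianDiff kv.2 = m then [kv.1] else [])) := by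
        by_cases heq : tjMedianDiff kv.2 = m
        · simp [tjStep, heq]
        · have : ¬ (m == tjMedianDiff kv.2) = true := by
            simp; omega
          simp [tjStep, hgt, this, heq]
      rw [hstep, ih]
      have hmax : tjMax m (kv :: t) = tjMax m t := by
        simp [tjMax, max_eq_left (le_of_not_gt hgt)]
      have hdec : decide (m < tjMedianDiff kv.2) = false := by simp; omega
      simp only [hmax, hdec, Bool.false_or]
      by_cases ht : t.any (fun kv => decide (m < tjMedianDiff kv.2)) = true
      · rw [if_pos ht, if_pos ht]
        rcases List.any_eq_true.mp ht with ⟨x, hx, hlt⟩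
        have hF : m < tjMax m t := tjMax_gt t _ x hx (of_decide_eq_true hlt)
        rw [tjKeysWith_cons, if_neg (by omega), List.nil_append]
      · rw [if_neg ht, if_neg ht, tjKeysWith_cons, List.append_assoc]

theorem tj_foldl_map_max (t : List (String × List Int)) (d : Int) :
    (t.map (fun kv => (kv.1, tjMedianDiff kv.2)) |>.map (fun kv => kv.2)).foldl max d = tjMax d t := by
  simp [tjMax, List.foldl_map]

-- ===== VERDICT (by name: the statement is the Claim_ definition above) =====
theorem tj_main (w : List String) (l : List (String × List Int)) :
    (l.foldl tjStep ((none : Option Int), w)).2 =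
    (if l.isEmpty then w else
      let table := l.map (fun kv => (kv.1, tjMedianDiff kv.2))
      let best := (PySem.List.max? (table.map (fun kv => kv.2)) (fun d => d)).getD 0
      (table.filter (fun kv => kv.2 == best)).map (fun kv => kv.1)) := by
  cases l with
  | nil => simp
  | cons kv t =>
    simp only [List.isEmpty_cons, Bool.false_eq_true, if_false, List.foldl_cons]
    have h0 : tjStep ((none : Option Int), w) kv = (some (tjMedianDiff kv.2), [kv.1]) := rfl
    rw [h0, tj_inv]
    simp only [List.map_cons, PySem.List.max?_id_cons, Option.getD_some]
    rw [tj_foldl_map_max]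
    by_cases ht : t.any (fun x => decide (tjMedianDiff kv.2 < tjMedianDiff x.2)) = true
    · rw [if_pos ht]
      rcases List.any_eq_true.mp ht with ⟨x, hx, hlt⟩
      have hF : tjMedianDiff kv.2 < tjMax (tjMedianDiff kv.2) t :=
        tjMax_gt t _ x hx (of_decide_eq_true hlt)
      show tjKeysWith (tjMax (tjMedianDiff kv.2) t) t = tjKeysWith (tjMax (tjMedianDiff kv.2) t) (kv :: t)
      rw [tjKeysWith_cons, if_neg (by omega), List.nil_append]
    · rw [if_neg ht]
      have hall : ∀ x ∈ t, tjMedianDiff x.2 ≤ tjMedianDiff kv.2 := by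
        intro x hx
        by_contra hc
        exact ht (List.any_eq_true.mpr ⟨x, hx, decide_eq_true (by omega)⟩)
      rw [tjMax_eq_of_all_le t _ hall]
      show [kv.1] ++ tjKeysWith (tjMedianDiff kv.2) t = tjKeysWith (tjMedianDiff kv.2) (kv :: t)
      rw [tjKeysWith_cons, if_pos rfl]

theorem typical_judgement_spec : Claim_equal_typical_judgement := by
  intro winners ranks candidates _ _
  unfold Spec_typical_judgement typical_judgement typical_judgement_alt
  rw [tjStep_eq]
  exact tj_main winners _
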